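-- pv_equiv track=rewrite | github.com/nikrodol/case07 | main.py | dict_of_links
-- ===== SOURCE A (Python) =====
-- def dict_of_links(text_list):
--     """ Составляет словарь звеньвев и связок из подоваемого списка """
--     d = {}
--     l = []
--     for i in range(len(text_list)-1):
--         if text_list[i] not in d:
--             for j in range(len(text_list)-1):
--                 if text_list[i] == text_list[j]:
--                     l.append(text_list[j+1])
--             d.update({text_list[i]: l})
--         l = []
--     d.update({text_list[len(text_list) - 1]: []})
--     return d
-- ===== SOURCE B (Python) =====
-- def dict_of_links(text_list):
--     """ Составляет словарь звеньвев и связок из подоваемого списка """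
--     d = {}
--     for a, b in zip(text_list, text_list[1:]):
--         d.setdefault(a, []).append(b)
--     d[text_list[-1]] = []
--     return d
-- ===== Notes on version B (the rewrite author's own statement) =====
-- stated objective: faster
-- what changed: replaces the membership test plus a full inner rescan per element by a single pass over adjacent pairs with dict.setdefault(...).append, then overwrites the last element's entry with []
-- outside the precondition, e.g. on dict_of_links([]): A raises IndexError, B raises IndexError
import Mathlib
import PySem

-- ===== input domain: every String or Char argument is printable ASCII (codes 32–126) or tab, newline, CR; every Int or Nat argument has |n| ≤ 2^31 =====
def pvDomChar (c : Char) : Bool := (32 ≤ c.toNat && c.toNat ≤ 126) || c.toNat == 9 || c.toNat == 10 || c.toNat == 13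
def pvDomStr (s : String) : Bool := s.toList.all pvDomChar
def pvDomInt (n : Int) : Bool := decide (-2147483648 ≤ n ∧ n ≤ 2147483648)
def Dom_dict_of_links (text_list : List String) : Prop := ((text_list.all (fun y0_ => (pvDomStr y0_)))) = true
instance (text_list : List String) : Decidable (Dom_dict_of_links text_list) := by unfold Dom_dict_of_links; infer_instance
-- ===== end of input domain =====

-- B replaces A's quadratic membership-test-plus-rescan by one pass over adjacent pairs with setdefault/append (return value equivalence).

-- ===== PORT A =====
def dict_of_links (text_list : List String) : List (String × List String) :=
  let n : Int := (text_list.length : Int)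
  let d := (PySem.List.pyRange 0 (n - 1) 1).foldl
    (fun (d : PySem.Dict String (List String)) i =>
      if d.contains (PySem.List.pyGetD text_list i "") = false then
        let l := (PySem.List.pyRange 0 (n - 1) 1).foldl
          (fun (l : List String) j =>
            if PySem.List.pyGetD text_list i "" = PySem.List.pyGetD text_list j ""
            then l ++ [PySem.List.pyGetD text_list (j + 1) ""] else l) []
        d.insert (PySem.List.pyGetD text_list i "") l
      else d)
    PySem.Dict.empty
  (d.insert (PySem.List.pyGetD text_list (n - 1) "") []).items

-- ===== PORT B =====
def dict_of_links_alt (text_list : List String) : List (String × List String) :=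
  let d := (text_list.zip (PySem.List.slice text_list (some 1) none)).foldl
    (fun (d : PySem.Dict String (List String)) p => d.modify p.1 [] (· ++ [p.2]))
    PySem.Dict.empty
  (d.insert (PySem.List.pyGetD text_list (-1) "") []).items

-- ===== PRECONDITION & SPEC =====
-- Pre_ excludes only the empty list, on which Python A raises IndexError (text_list[-1]).
def Pre_dict_of_links (text_list : List String) : Prop := text_list ≠ []
instance (text_list : List String) : Decidable (Pre_dict_of_links text_list) := by unfold Pre_dict_of_links; infer_instance
def pvWitness_dict_of_links : List String := ["a", "b", "a", "c"]

def Spec_dict_of_links (text_list : List String) (out : List (String × List String)) : Prop := out = dict_of_links_alt text_list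
instance (text_list : List String) (out : List (String × List String)) : Decidable (Spec_dict_of_links text_list out) := by unfold Spec_dict_of_links; infer_instance

-- ===== CLAIM (what is proved, stated in full; the proofs are below) =====
def Claim_equal_dict_of_links : Prop := ∀ (text_list : List String), Dom_dict_of_links text_list → Pre_dict_of_links text_list → Spec_dict_of_links text_list (dict_of_links text_list)

-- ===== LEMMAS AND PROOFS =====

def pvVals (ps : List (String × String)) (a : String) : List String :=
  (ps.filter (fun q => q.1 == a)).map (·.2)

def pvStepA (v : String → List String) (d : PySem.Dict String (List String)) (p : String × String) : PySem.Dict String (List String) :=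
  if d.contains p.1 = false then d.insert p.1 (v p.1) else d

theorem pvKeysA (v : String → List String) (l : List (String × String)) (d : PySem.Dict String (List String)) :
    (l.foldl (pvStepA v) d).keys = PySem.Set.update d.keys (l.map (·.1)) := by
  induction l generalizing d with
  | nil => simp [PySem.Set.update_nil]
  | cons p l ih =>
    simp only [List.foldl_cons, List.map_cons, PySem.Set.update_cons, ih]
    congr 1
    unfold pvStepA
    by_cases hc : d.contains p.1 = false
    · rw [if_pos hc, PySem.Dict.keys_insert_of_not_contains _ _ hc,
        PySem.Set.add_of_not_mem]
      intro hm
      rw [← PySem.Dict.contains_iff_mem_keys] at hm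
      simp [hm] at hc
    · rw [if_neg hc, PySem.Set.add_of_mem]
      rw [← PySem.Dict.contains_iff_mem_keys]
      simpa using hc

theorem pvGetDA (v : String → List String) (l : List (String × String)) (d : PySem.Dict String (List String)) (k : String) :
    (l.foldl (pvStepA v) d).getD k [] =
      if d.contains k = true then d.getD k []
      else if k ∈ l.map (·.1) then v k else [] := by
  induction l generalizing d with
  | nil =>
    simp only [List.foldl_nil, List.map_nil, List.not_mem_nil, if_false]
    by_cases h : d.contains k = true
    · simp [h]
    · simp [h]; exact PySem.Dict.getD_of_not_contains _ _ (by simpa using h)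
  | cons p l ih =>
    simp only [List.foldl_cons, ih]
    unfold pvStepA
    by_cases hc : d.contains p.1 = false
    · rw [if_pos hc]
      by_cases hk : k = p.1
      · subst hk
        simp [PySem.Dict.contains_insert_self, PySem.Dict.getD_insert_self, hc]
      · rw [PySem.Dict.contains_insert, PySem.Dict.getD_insert_of_ne _ _ _ hk]
        have hb : (k == p.1) = false := by simp [hk]
        simp only [hb, Bool.false_or, List.map_cons, List.mem_cons, hk, false_or]
    · rw [if_neg hc]
      simp only [Bool.not_eq_false] at hc
      by_cases hk : k = p.1
      · subst hk; simp [hc]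
      · by_cases h2 : d.contains k = true
        · simp [h2]
        · simp [h2]
          simp only [List.mem_cons, hk, false_or]

theorem pvItemsEq (d : PySem.Dict String (List String)) (h : d.keys.Nodup) :
    d.items = d.keys.map (fun k => (k, d.getD k [])) := by
  conv_lhs => rw [← List.map_id d.items]
  simp only [PySem.Dict.keys, List.map_map]
  apply List.map_congr_left
  intro p hp
  have := PySem.Dict.getD_of_mem_items d (k := p.1) (v := p.2) (by simpa using hp) h []
  simp [Function.comp, this]

theorem pvInner (xi : String) (ps : List (String × String)) :
    ps.foldl (fun l q => if xi = q.1 then l ++ [q.2] else l) ([] : List String) = pvVals ps xi := by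
  have hstep : ∀ (l : List String) (q : String × String),
      (if xi = q.1 then l ++ [q.2] else l) = (if (q.1 == xi) = true then l ++ [q.2] else l) := by
    intro l q
    by_cases h : xi = q.1
    · simp [h]
    · simp [h]
      exact fun e => h e.symm
  rw [PySem.List.foldl_congr_mem' ps _ (fun l q => if (q.1 == xi) = true then l ++ [q.2] else l) []
      (fun q _ acc => hstep acc q)]
  rw [PySem.List.foldl_append_if]
  rfl

theorem pvCore (ps : List (String × String)) :
    ps.foldl (pvStepA (pvVals ps)) PySem.Dict.empty
      = ps.foldl (fun d p => d.modify p.1 [] (· ++ [p.2])) PySem.Dict.empty := by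
  have hkA := pvKeysA (pvVals ps) ps PySem.Dict.empty
  have hkB := PySem.Dict.keys_foldl_modify_key ps (·.1) [] (fun _ p => (· ++ [p.2])) PySem.Dict.empty
  rw [PySem.Dict.keys_empty, PySem.Set.update_nil_left] at hkA hkB
  have hnA : (ps.foldl (pvStepA (pvVals ps)) PySem.Dict.empty).keys.Nodup := by
    rw [hkA]; exact PySem.Set.nodup_ofList _
  have hnB : (ps.foldl (fun d p => d.modify p.1 [] (· ++ [p.2])) PySem.Dict.empty).keys.Nodup := by
    rw [hkB]; exact PySem.Set.nodup_ofList _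
  apply PySem.Dict.ext
  rw [pvItemsEq _ hnA, pvItemsEq _ hnB, hkA, hkB]
  apply List.map_congr_left
  intro k hk
  have hkmem : k ∈ ps.map (·.1) := (PySem.Set.mem_ofList _ _).1 hk
  have hA := pvGetDA (pvVals ps) ps PySem.Dict.empty k
  rw [PySem.Dict.contains_empty] at hA
  simp only [Bool.false_eq_true, if_false, hkmem, if_true] at hA
  have hB := PySem.Dict.getD_foldl_modify_append ps PySem.Dict.empty k
  rw [PySem.Dict.getD_empty] at hB
  simp only [List.nil_append] at hB
  rw [hA, hB]
  rfl
theorem pvMain (xs : List String) (hne : xs ≠ []) : dict_of_links xs = dict_of_links_alt xs := by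
  have hn : 0 < xs.length := List.length_pos_of_ne_nil hne
  have hrange : PySem.List.pyRange 0 ((xs.length : Int) - 1) 1
      = (List.range (xs.length - 1)).map (Nat.cast : Nat → Int) := by
    rw [PySem.List.pyRange_one, show (((xs.length : Int) - 1) - 0).toNat = xs.length - 1 from by omega]
    exact List.map_congr_left (fun a _ => by simp)
  have hpairs : xs.zip xs.tail
      = (List.range (xs.length - 1)).map (fun j => (xs.getD j "", xs.getD (j + 1) "")) := by
    apply List.ext_getElem
    · simp
    · intro i h1 h2
      have hi : i < xs.length - 1 := by simpa using h2
      simp only [List.getElem_zip, List.getElem_map, List.getElem_range, List.getElem_tail]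
      have e1 : xs.getD i "" = xs[i] := List.getD_eq_getElem _ _ (show i < xs.length by omega)
      have e2 : xs.getD (i + 1) "" = xs[i + 1] := List.getD_eq_getElem _ _ (show i + 1 < xs.length by omega)
      rw [e1, e2]
  have hlast : PySem.List.pyGetD xs ((xs.length : Int) - 1) "" = PySem.List.pyGetD xs (-1) "" := by
    have h1 : ((xs.length : Int) - 1) = ((xs.length - 1 : Nat) : Int) := by omega
    have h2 : (-1 : Int) = -((1 : Nat) : Int) := by norm_num
    rw [h1, h2, PySem.List.pyGetD_natCast, PySem.List.pyGetD_neg_natCast xs 1 "" (by norm_num) hn,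
      List.getD_eq_getElem _ _ (by omega)]
  simp only [dict_of_links, dict_of_links_alt, PySem.List.slice_from_one]
  rw [hlast, hrange, hpairs]
  rw [← pvCore ((List.range (xs.length - 1)).map (fun j => (xs.getD j "", xs.getD (j + 1) "")))]
  simp only [List.foldl_map]
  congr 2
  apply PySem.List.foldl_congr_mem'
  intro j hj d
  have hj' : j < xs.length - 1 := List.mem_range.1 hj
  simp only [PySem.List.pyGetD_natCast]
  have hinner : (List.range (xs.length - 1)).foldl
      (fun (l : List String) (j' : Nat) =>
        if xs.getD j "" = xs.getD j' ""
        then l ++ [PySem.List.pyGetD xs ((j' : Int) + 1) ""] else l) []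
      = pvVals ((List.range (xs.length - 1)).map (fun j => (xs.getD j "", xs.getD (j + 1) "")))
          (xs.getD j "") := by
    rw [PySem.List.foldl_congr_mem' _ _
      (fun (l : List String) (j' : Nat) =>
        if xs.getD j "" = xs.getD j' "" then l ++ [xs.getD (j' + 1) ""] else l) []
      (by
        intro j' _ acc
        have hc : ((j' : Int) + 1) = ((j' + 1 : Nat) : Int) := by push_cast; ring
        simp only [hc, PySem.List.pyGetD_natCast])]
    rw [← List.foldl_map (f := fun j' => (xs.getD j' "", xs.getD (j' + 1) ""))
      (g := fun (l : List String) (q : String × String) =>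
        if xs.getD j "" = q.1 then l ++ [q.2] else l)]
    exact pvInner _ _
  rw [hinner]
  rfl

-- ===== VERDICT (by name: the statement is the Claim_ definition above) =====
theorem dict_of_links_spec : Claim_equal_dict_of_links := by
  intro xs _ hpre
  exact pvMain xs hpre
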